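-- pv_equiv track=rewrite | github.com/adabiraihan/IDS-based-Machine-Learning | zeek/auxil/package-manager/zeekpkg/_util.py | is_sha1
-- ===== SOURCE A (Python) =====
-- def is_sha1(s):
--     if not s:
--         return False;
--
--     if len(s) != 40:
--         return False
--
--     for c in s:
--         if c not in {'a', 'b', 'c', 'd', 'e', 'f',
--                      '0', '1', '2', '3', '4', '5', '6', '7', '8', '9'}:
--             return False
--
--     return True
-- ===== SOURCE B (Python) =====
-- def is_sha1(s):
--     if len(s) != 40:
--         return False
--     return sum(s.count(c) for c in "0123456789abcdef") == 40
-- ===== Notes on version B (the rewrite author's own statement) =====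
-- stated objective: alternative
-- what changed: Instead of scanning s character by character with an early exit on a set-membership test, B iterates over the 16-letter hex alphabet, sums s.count(c) per allowed character, and accepts iff the total equals the length 40 (non-hex characters are never counted, so the total reaches 40 only when every character is hex).
import Mathlib
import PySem

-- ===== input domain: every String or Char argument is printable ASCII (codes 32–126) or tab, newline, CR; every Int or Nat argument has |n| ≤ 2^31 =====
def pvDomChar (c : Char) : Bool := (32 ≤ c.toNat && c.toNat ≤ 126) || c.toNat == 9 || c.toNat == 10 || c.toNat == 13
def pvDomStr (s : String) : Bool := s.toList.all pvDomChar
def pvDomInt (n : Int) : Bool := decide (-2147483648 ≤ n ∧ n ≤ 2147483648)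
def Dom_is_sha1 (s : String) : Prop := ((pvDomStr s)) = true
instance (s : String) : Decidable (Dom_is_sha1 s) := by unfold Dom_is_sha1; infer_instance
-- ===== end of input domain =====

-- B replaces A's per-character early-exit membership loop over s by an outer loop over the
-- 16-letter hex alphabet summing per-character counts, accepting iff the total equals 40 (alternative).


-- ===== PORT A =====
-- the literal set {'a',…,'f','0',…,'9'} from A, in source order
def hexSetA : PySem.Set Char :=
  PySem.Set.ofList ['a','b','c','d','e','f','0','1','2','3','4','5','6','7','8','9']

-- the 'for c in s: if c not in {…}: return False' loop with its early return
def isSha1LoopA : List Char → Bool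
  | [] => true
  | c :: rest => if ¬ PySem.Set.contains hexSetA c then false else isSha1LoopA rest

def is_sha1 (s : String) : Bool :=
  if s.toList.length = 0 then false          -- 'if not s'
  else if s.toList.length ≠ 40 then false    -- 'if len(s) != 40'
  else isSha1LoopA s.toList                  -- the loop, then 'return True'

-- ===== PORT B =====
def hexAlphabet : List Char := "0123456789abcdef".toList

def is_sha1_alt (s : String) : Bool :=
  if s.toList.length ≠ 40 then false            -- 'if len(s) != 40'
  else                                           -- 'sum(s.count(c) for c in "0123456789abcdef") == 40'
    (hexAlphabet.map (fun c => PySem.Str.count s (String.ofList [c]))).sum = 40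

-- ===== PRECONDITION & SPEC =====
def Spec_is_sha1 (s : String) (out : Bool) : Prop := out = is_sha1_alt s
instance (s : String) (out : Bool) : Decidable (Spec_is_sha1 s out) := by unfold Spec_is_sha1; infer_instance

-- ===== CLAIM (what is proved, stated in full; the proofs are below) =====
def Claim_equal_is_sha1 : Prop := ∀ (s : String), Dom_is_sha1 s → Spec_is_sha1 s (is_sha1 s)

-- ===== LEMMAS AND PROOFS =====
-- Python s.count of a single-character needle is the character count
theorem chars_count_go_single (c : Char) :
    ∀ (fuel : Nat) (l : List Char) (acc : Nat), l.length ≤ fuel →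
      PySem.Chars.count.go [c] fuel l acc = acc + l.count c := by
  intro fuel
  induction fuel with
  | zero => intro l acc h; cases l with
    | nil => simp [PySem.Chars.count.go]
    | cons x t => simp at h
  | succ n ih =>
    intro l acc h
    cases l with
    | nil => simp [PySem.Chars.count.go]
    | cons x t =>
      simp only [PySem.Chars.count.go]
      by_cases hx : c = x
      · subst hx
        have : List.isPrefixOf [c] (c :: t) = true := by simp [List.isPrefixOf]
        rw [if_pos this]
        simp only [List.length, List.drop_succ_cons, List.drop_zero]
        rw [ih t (acc + 1) (by simp at h; omega)]
        simp [List.count_cons]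
        omega
      · have : ¬ List.isPrefixOf [c] (x :: t) = true := by
          simp [List.isPrefixOf, hx]
        rw [if_neg this]
        rw [ih t acc (by simp at h; omega)]
        simp [List.count_cons, beq_iff_eq, Ne.symm hx]

theorem chars_count_single (l : List Char) (c : Char) :
    PySem.Chars.count l [c] = l.count c := by
  rw [show PySem.Chars.count l [c] = PySem.Chars.count.go [c] l.length l 0 from rfl]
  rw [chars_count_go_single c l.length l 0 (le_refl _)]
  omega

-- sum of a pointwise-added map splits
theorem sum_map_add_nat (d : List Char) (f g : Char → Nat) :
    (d.map (fun c => f c + g c)).sum = (d.map f).sum + (d.map g).sum := by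
  induction d with
  | nil => simp
  | cons y t ih => simp [ih]; omega

theorem sum_indicator_zero (x : Char) (d : List Char) (hx : x ∉ d) :
    (d.map (fun c => if x == c then 1 else 0)).sum = 0 := by
  induction d with
  | nil => simp
  | cons y t ih =>
    simp only [List.map_cons, List.sum_cons]
    have hxy : ¬ (x == y) = true := by simp; intro h; exact hx (h ▸ List.mem_cons_self)
    rw [if_neg hxy, ih (fun h => hx (List.mem_cons_of_mem _ h))]

theorem sum_indicator (x : Char) (d : List Char) (hd : d.Nodup) :
    (d.map (fun c => if x == c then 1 else 0)).sum = if d.contains x then 1 else 0 := by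
  induction d with
  | nil => simp
  | cons y t ih =>
    simp only [List.map_cons, List.sum_cons]
    rcases List.nodup_cons.mp hd with ⟨hy, ht⟩
    by_cases hxy : x = y
    · subst hxy
      rw [if_pos (by simp), sum_indicator_zero x t hy]
      simp
    · rw [if_neg (by simp [hxy]), ih ht]
      simp [hxy]

-- the total of per-alphabet-letter counts is the number of alphabet letters in l
theorem sum_counts (d : List Char) (hd : d.Nodup) (l : List Char) :
    (d.map (fun c => l.count c)).sum = l.countP (fun x => d.contains x) := by
  induction l with
  | nil => simp
  | cons x t ih =>
    have h1 : (d.map (fun c => (x :: t).count c)).sum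
        = (d.map (fun c => t.count c)).sum + (d.map (fun c => if x == c then 1 else 0)).sum := by
      rw [← sum_map_add_nat]
      exact congrArg List.sum (List.map_congr_left (fun c _ => by
        rcases eq_or_ne x c with h | h
        · subst h; simp [List.count_cons]
        · simp [List.count_cons, h, h.symm]))
    rw [h1, ih, sum_indicator x d hd, List.countP_cons]

-- A's early-exit loop returns true iff every character lies in A's hex set
theorem isSha1LoopA_eq_all (l : List Char) :
    isSha1LoopA l = l.all (fun c => PySem.Set.contains hexSetA c) := by
  induction l with
  | nil => rfl
  | cons c rest ih =>
    simp only [isSha1LoopA, List.all_cons, ih]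
    by_cases h : PySem.Set.contains hexSetA c = true <;> simp [h]

-- A's membership set and B's alphabet admit the same characters
theorem hexMem_iff (c : Char) :
    PySem.Set.contains hexSetA c = hexAlphabet.contains c := by
  rw [Bool.eq_iff_iff]
  simp only [PySem.Set.contains_iff, hexSetA, PySem.Set.mem_ofList, hexAlphabet,
    List.contains_iff_mem]
  constructor <;> (intro h; simp at h ⊢; tauto)

theorem hexAlphabet_nodup : hexAlphabet.Nodup := by decide

-- ===== VERDICT (by name: the statement is the Claim_ definition above) =====
theorem is_sha1_spec : Claim_equal_is_sha1 := by
  intro s _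
  unfold Spec_is_sha1 is_sha1 is_sha1_alt
  by_cases h40 : s.toList.length = 40
  · rw [if_neg (by omega : ¬ s.toList.length = 0),
      if_neg (by omega : ¬ s.toList.length ≠ 40),
      if_neg (by omega : ¬ s.toList.length ≠ 40)]
    have hcnt : ∀ c : Char, PySem.Str.count s (String.ofList [c]) = s.toList.count c := by
      intro c
      rw [PySem.Str.count_eq]
      have h2 : (String.ofList [c]).toList = [c] := by simp
      rw [h2]
      exact chars_count_single s.toList c
    have : (hexAlphabet.map (fun c => PySem.Str.count s (String.ofList [c]))).sum
        = s.toList.countP (fun x => hexAlphabet.contains x) := by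
      rw [show (hexAlphabet.map (fun c => PySem.Str.count s (String.ofList [c])))
          = hexAlphabet.map (fun c => s.toList.count c) by
        apply List.map_congr_left; intro c _; exact hcnt c]
      exact sum_counts hexAlphabet hexAlphabet_nodup s.toList
    rw [isSha1LoopA_eq_all, this, Bool.eq_iff_iff]
    rw [← h40, decide_eq_true_iff, List.countP_eq_length, List.all_eq_true]
    constructor <;> (intro h c hc; have := h c hc; rw [hexMem_iff] at * <;> assumption)
  · rw [if_pos h40, if_pos h40]
    by_cases h0 : s.toList.length = 0
    · rw [if_pos h0]
    · rw [if_neg h0]
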